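-- pv_equiv track=rewrite | github.com/ameralaa/semiPrimes-cryptography | divisor_free_generator_optimized.py | method2_power_offset
-- ===== SOURCE A (Python) =====
-- from math import gcd, lcm
-- from typing import List, Set
--
-- def method2_power_offset(divisors: List[int], count: int, base: int = 2) -> List[int]:
--     L = lcm(*divisors)
--     Mo = 1
--     results = []
--     p = 1
--     while len(results) < count:
--         val = Mo * L + (base ** p)
--         if all(val % d != 0 for d in divisors):
--             results.append(val)
--         p += 1
--     return results
-- ===== SOURCE B (Python) =====
-- from math import lcm
--
-- def method2_power_offset(divisors, count, base=2):
--     # Track base^p mod each divisor with small ints; build the big value only on accept.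
--     L = lcm(*divisors)
--     out = []
--     res = [1] * len(divisors)   # base^0 residue placeholders
--     pw = 1                      # base ** p, maintained incrementally
--     while len(out) < count:
--         pw *= base
--         res = [(r * base) % d for r, d in zip(res, divisors)]
--         if all(res):
--             out.append(L + pw)
--     return out
-- ===== Notes on version B (the rewrite author's own statement) =====
-- stated objective: alternative
-- what changed: B maintains base^p mod each divisor as small incrementally-updated residues and an incrementally-updated power, instead of recomputing the big power and taking a bignum remainder of the full candidate value by every divisor at every step.
import Mathlib
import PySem

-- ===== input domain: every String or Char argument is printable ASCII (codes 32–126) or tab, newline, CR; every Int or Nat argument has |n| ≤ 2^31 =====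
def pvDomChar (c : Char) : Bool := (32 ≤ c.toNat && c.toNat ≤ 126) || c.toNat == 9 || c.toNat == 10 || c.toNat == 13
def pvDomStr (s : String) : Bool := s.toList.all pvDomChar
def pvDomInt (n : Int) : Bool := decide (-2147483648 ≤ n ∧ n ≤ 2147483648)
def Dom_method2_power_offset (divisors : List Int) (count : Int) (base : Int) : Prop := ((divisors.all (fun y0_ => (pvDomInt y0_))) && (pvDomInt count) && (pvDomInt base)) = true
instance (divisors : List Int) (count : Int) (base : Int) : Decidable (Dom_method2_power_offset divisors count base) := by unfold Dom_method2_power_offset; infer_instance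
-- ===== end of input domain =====

-- B tracks base^p mod each divisor with small incrementally-updated residues and an incremental
-- power, instead of testing the full big candidate against every divisor each round (alternative
-- algorithm working on small residues; no speed-up is claimed).

-- ===== PORT A =====
-- math.lcm(*divisors): fold of lcm starting from 1 (Python's lcm is nonnegative, as is Int.lcm)
def pvLcmList (l : List Int) : Int := l.foldl (fun a d => (Int.lcm a d : Int)) 1

-- the while loop; fuel = count.toNat (inside Pre_ every candidate is accepted, so this is exact)
def m2Aloop (divisors : List Int) (count base L : Int) : Nat → List Int → Nat → List Int
  | 0, results, _ => results
  | fuel+1, results, p =>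
    if (results.length : Int) < count then
      let val := 1 * L + base ^ p
      let results' := if divisors.all (fun d => PySem.Int.mod val d != 0) then results ++ [val] else results
      m2Aloop divisors count base L fuel results' (p+1)
    else results

def method2_power_offset (divisors : List Int) (count : Int) (base : Int) : List Int :=
  let L := pvLcmList divisors
  m2Aloop divisors count base L count.toNat [] 1

-- ===== PORT B =====
def m2Bloop (divisors : List Int) (count base L : Int) : Nat → List Int → List Int → Int → List Int
  | 0, out, _, _ => out
  | fuel+1, out, res, pw =>
    if (out.length : Int) < count then
      let pw' := pw * base
      let res' := (res.zip divisors).map (fun rd => PySem.Int.mod (rd.1 * base) rd.2)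
      let out' := if res'.all (fun r => r != 0) then out ++ [L + pw'] else out
      m2Bloop divisors count base L fuel out' res' pw'
    else out

def method2_power_offset_alt (divisors : List Int) (count : Int) (base : Int) : List Int :=
  let L := pvLcmList divisors
  m2Bloop divisors count base L count.toNat [] (divisors.map (fun _ => (1 : Int))) 1

-- ===== PRECONDITION & SPEC =====
-- Pre_ excludes exactly the inputs on which A does not return a value: count > 0 with a zero divisor
-- (ZeroDivisionError on val % 0) or with some divisor dividing base^k for some k ≤ min(count, 31)
-- (divisibility by base powers is upward-closed in the exponent, and on this |d| ≤ 2^31 domain any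
-- divisor of a base power divides base^31, so from that k on every candidate is rejected and the
-- while loop never collects count values: A diverges).
def Pre_method2_power_offset (divisors : List Int) (count : Int) (base : Int) : Prop :=
  count ≤ 0 ∨ ((∀ d ∈ divisors, d ≠ 0) ∧
    ∀ k ∈ List.range 32, 1 ≤ k → (k : Int) ≤ count → ∀ d ∈ divisors, ¬ (d ∣ base ^ k))
instance (divisors : List Int) (count : Int) (base : Int) : Decidable (Pre_method2_power_offset divisors count base) := by unfold Pre_method2_power_offset; infer_instance
def pvWitness_method2_power_offset : List Int × Int × Int := ([3, 5], 3, 2)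

def Spec_method2_power_offset (divisors : List Int) (count : Int) (base : Int) (out : List Int) : Prop := out = method2_power_offset_alt divisors count base
instance (divisors : List Int) (count : Int) (base : Int) (out : List Int) : Decidable (Spec_method2_power_offset divisors count base out) := by unfold Spec_method2_power_offset; infer_instance

-- ===== CLAIM =====
def Claim_equal_method2_power_offset : Prop := ∀ (divisors : List Int) (count : Int) (base : Int), Dom_method2_power_offset divisors count base → Pre_method2_power_offset divisors count base → Spec_method2_power_offset divisors count base (method2_power_offset divisors count base)

-- ===== LEMMAS AND PROOFS =====

-- any element of the list divides the folded lcm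
theorem pv_start_dvd_foldl_lcm (l : List Int) : ∀ a : Int, a ∣ l.foldl (fun a d => (Int.lcm a d : Int)) a := by
  induction l with
  | nil => intro a; exact dvd_refl a
  | cons b t ih =>
    intro a
    exact dvd_trans (Int.dvd_lcm_left a b) (ih _)

theorem pv_mem_dvd_foldl_lcm (l : List Int) : ∀ (a d : Int), d ∈ l → d ∣ l.foldl (fun a d => (Int.lcm a d : Int)) a := by
  induction l with
  | nil => intro a d h; cases h
  | cons b t ih =>
    intro a d h
    rcases List.mem_cons.1 h with h | h
    · subst h; exact dvd_trans (Int.dvd_lcm_right a d) (pv_start_dvd_foldl_lcm t _)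
    · exact ih _ d h

theorem pv_mem_dvd_pvLcmList (l : List Int) (d : Int) (h : d ∈ l) : d ∣ pvLcmList l :=
  pv_mem_dvd_foldl_lcm l 1 d h

-- number theory: a divisor of a positive power, bounded by 2^31, divides the 31st power
theorem pv_nat_dvd_pow31 {n m k : Nat} (hn : n ≤ 2 ^ 31) (hk : 1 ≤ k) (h : n ∣ m ^ k) : n ∣ m ^ 31 := by
  rcases Nat.eq_zero_or_pos n with hn0 | hn0
  · subst hn0
    have : m ^ k = 0 := Nat.eq_zero_of_zero_dvd h
    have hm : m = 0 := by
      rcases Nat.pow_eq_zero.1 this with ⟨hm, _⟩ <;> omega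
    simp [hm]
  rcases Nat.eq_zero_or_pos m with hm0 | hm0
  · subst hm0
    have : (0:Nat) ^ 31 = 0 := by norm_num
    rw [this]
    exact Dvd.intro 0 rfl
  have hnne : n ≠ 0 := Nat.pos_iff_ne_zero.1 hn0
  have hmne : m ^ 31 ≠ 0 := pow_ne_zero _ (Nat.pos_iff_ne_zero.1 hm0)
  have hmkne : m ^ k ≠ 0 := pow_ne_zero _ (Nat.pos_iff_ne_zero.1 hm0)
  rw [← Nat.factorization_le_iff_dvd hnne hmne]
  rw [← Nat.factorization_le_iff_dvd hnne hmkne] at h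
  intro q
  have hq := h q
  rw [Nat.factorization_pow] at hq ⊢
  simp only [Finsupp.smul_apply, smul_eq_mul] at hq ⊢
  by_cases hqp : q.Prime
  · rcases Nat.eq_zero_or_pos (m.factorization q) with hf | hf
    · rw [hf] at hq ⊢; omega
    · have he : n.factorization q ≤ 31 := by
        have h1 : q ^ n.factorization q ∣ n := Nat.ordProj_dvd n q
        have h2 : q ^ n.factorization q ≤ n := Nat.le_of_dvd hn0 h1
        have h3 : 2 ^ n.factorization q ≤ q ^ n.factorization q :=
          Nat.pow_le_pow_left hqp.two_le _
        have h4 : 2 ^ n.factorization q ≤ 2 ^ 31 := le_trans h3 (le_trans h2 hn)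
        exact (Nat.pow_le_pow_iff_right (by norm_num)).1 h4
      calc n.factorization q ≤ 31 := he
        _ ≤ 31 * m.factorization q := Nat.le_mul_of_pos_right _ hf
  · rw [Nat.factorization_eq_zero_of_not_prime n hqp]
    exact Nat.zero_le _

theorem pv_int_dvd_pow31 {d b : Int} (hd : d.natAbs ≤ 2 ^ 31) {k : Nat} (hk : 1 ≤ k) (h : d ∣ b ^ k) : d ∣ b ^ 31 := by
  rw [← Int.natAbs_dvd_natAbs] at h ⊢
  rw [Int.natAbs_pow] at h ⊢
  exact pv_nat_dvd_pow31 hd hk h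

-- mod leaves a multiple of the divisor behind: d ∣ (a - mod a d)
theorem pv_dvd_sub_mod (a d : Int) : d ∣ (a - PySem.Int.mod a d) := by
  have h := PySem.Int.floordiv_mul_add_mod a d
  exact ⟨PySem.Int.floordiv a d, by linarith⟩

-- the main loop equivalence under the accept-up-to-N invariant
theorem pv_loop_eq (divisors : List Int) (count base L : Int) (N : Nat)
    (hL : ∀ d ∈ divisors, d ∣ L)
    (hd : ∀ d ∈ divisors, ∀ k : Nat, 1 ≤ k → k ≤ N → ¬ d ∣ base ^ k) :
    ∀ (fuel : Nat) (out res : List Int) (p : Nat) (hlen : res.length = divisors.length)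
      (hpN : p + fuel ≤ N),
      (∀ (i : Nat) (hi : i < divisors.length),
        divisors[i] ∣ (res[i]'(by omega) - base ^ p)) →
      m2Aloop divisors count base L fuel out (p+1) = m2Bloop divisors count base L fuel out res (base ^ p) := by
  intro fuel
  induction fuel with
  | zero => intro out res p _ _ _; rfl
  | succ f ih =>
    intro out res p hlen hpN hres
    by_cases hc : (out.length : Int) < count
    · have hkN : p + 1 ≤ N := by omega
      have hAall : divisors.all (fun d => PySem.Int.mod (1 * L + base ^ (p+1)) d != 0) = true := by
        rw [List.all_eq_true]
        intro d hdmem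
        rw [bne_iff_ne, Ne, PySem.Int.mod_eq_zero_iff_dvd]
        intro hdv
        have h1 : d ∣ (1 : Int) * L := by simpa using hL d hdmem
        have : d ∣ base ^ (p+1) := (dvd_add_right h1).1 hdv
        exact hd d hdmem (p+1) (by omega) hkN this
      have hresP : ∀ (i : Nat) (hi : i < divisors.length),
          divisors[i] ∣ ((res.zip divisors).map (fun rd => PySem.Int.mod (rd.1 * base) rd.2))[i]'(by
            simp [List.length_zip, hlen]; omega) - base ^ (p+1) := by
        intro i hi
        have hzl : i < (res.zip divisors).length := by simp [List.length_zip, hlen]; omega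
        rw [List.getElem_map, List.getElem_zip]
        have h1 : divisors[i] ∣ (res[i]'(by omega) * base - base ^ (p+1)) := by
          have := hres i hi
          have h2 : divisors[i] ∣ (res[i]'(by omega) - base ^ p) * base := Dvd.dvd.mul_right this base
          have : (res[i]'(by omega) - base ^ p) * base = res[i]'(by omega) * base - base ^ (p+1) := by ring
          rwa [this] at h2
        have h2 := pv_dvd_sub_mod (res[i]'(by omega) * base) (divisors[i])
        have h3 : divisors[i] ∣ PySem.Int.mod (res[i]'(by omega) * base) (divisors[i]) - base ^ (p+1) := by
          have := dvd_sub h1 h2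
          have heq : res[i]'(by omega) * base - base ^ (p+1) - (res[i]'(by omega) * base - PySem.Int.mod (res[i]'(by omega) * base) (divisors[i])) = PySem.Int.mod (res[i]'(by omega) * base) (divisors[i]) - base ^ (p+1) := by ring
          rwa [heq] at this
        exact h3
      have hBall : ((res.zip divisors).map (fun rd => PySem.Int.mod (rd.1 * base) rd.2)).all (fun r => r != 0) = true := by
        rw [List.all_eq_true]
        intro r hr
        rcases List.mem_iff_getElem.1 hr with ⟨i, hil, hig⟩
        have hi : i < divisors.length := by
          simp [List.length_zip, hlen] at hil; omega
        rw [bne_iff_ne, Ne]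
        intro h0
        have := hresP i hi
        rw [hig, h0] at this
        have : divisors[i] ∣ base ^ (p+1) := by
          have h4 : (0:Int) - base ^ (p+1) = -(base ^ (p+1)) := by ring
          rw [h4] at this
          exact (dvd_neg).1 this
        exact hd divisors[i] (List.getElem_mem hi) (p+1) (by omega) hkN this
      have hval : (1 : Int) * L + base ^ (p+1) = L + base ^ p * base := by ring
      simp only [m2Aloop, m2Bloop, hc, if_pos, hAall, hBall]
      rw [hval]
      have := ih (out ++ [L + base ^ p * base])
        ((res.zip divisors).map (fun rd => PySem.Int.mod (rd.1 * base) rd.2)) (p+1)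
        (by simp [List.length_zip, hlen])
        (by omega)
        (fun i hi => hresP i hi)
      rw [← pow_succ] at this ⊢
      exact this
    · simp only [m2Aloop, m2Bloop, hc]
      simp [hc]

-- ===== VERDICT =====
theorem method2_power_offset_spec : Claim_equal_method2_power_offset := by
  intro divisors count base hDom hPre
  unfold Spec_method2_power_offset method2_power_offset method2_power_offset_alt
  rcases hPre with hc | hPre
  · have : count.toNat = 0 := Int.toNat_of_nonpos hc
    simp [this, m2Aloop, m2Bloop]
  · have hDom' : ∀ d ∈ divisors, d.natAbs ≤ 2 ^ 31 := by
      unfold Dom_method2_power_offset at hDom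
      simp only [Bool.and_eq_true, List.all_eq_true, pvDomInt, decide_eq_true_eq] at hDom
      intro d hd
      have := hDom.1.1 d hd
      omega
    have hd : ∀ d ∈ divisors, ∀ k : Nat, 1 ≤ k → k ≤ count.toNat → ¬ d ∣ base ^ k := by
      intro d hdm k hk hkc hdvd
      by_cases hk31 : k ≤ 31
      · exact hPre.2 k (List.mem_range.2 (by omega)) hk (by omega) d hdm hdvd
      · have h31 : d ∣ base ^ 31 := pv_int_dvd_pow31 (hDom' d hdm) hk hdvd
        exact hPre.2 31 (List.mem_range.2 (by omega)) (by omega)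
          (by omega) d hdm h31
    have h := pv_loop_eq divisors count base (pvLcmList divisors) count.toNat
      (fun d hdm => pv_mem_dvd_pvLcmList divisors d hdm) hd
      count.toNat [] (divisors.map (fun _ => (1 : Int))) 0
      (by simp)
      (by omega)
      (by intro i hi; simp)
    simpa using h
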